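-- pv_equiv track=rewrite | github.com/ThomasSanna/arbres-et-graphes-L2SPI | TD2-recherche-chemins-specifiques/TD2.py | cheminB
-- ===== SOURCE A (Python) =====
-- def lireGraphe(mat):
--   sommets = [f'S{i}' for i in range(len(mat))]
--   listeAdjacence = {sommet : [] for sommet in sommets}
--   for i in range(len(mat)):
--     for j in range(len(mat)):
--       if mat[i][j] == 1:
--         listeAdjacence[sommets[i]].append(sommets[j])
--   return sommets, listeAdjacence
--
-- def successeurs(mat, S, LF):
--   _, graphes = lireGraphe(mat)
--   return [succ for succ in graphes[S] if succ not in LF]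
--
-- def cheminB(mat, d, a, ban):
--   Ls = [(d, [d])]
--   i=0
--   while i < len(Ls):
--     s, c = Ls[i]
--
--     if s == a:
--       return c
--
--     dejaFait = [elt[0] for elt in Ls]
--
--     for successeur in successeurs(mat, s, dejaFait + ban):
--       Ls += [(successeur, c + [successeur])]
--
--     i+=1
--   return []
-- ===== SOURCE B (Python) =====
-- def cheminB(mat, d, a, ban):
--     if d == a:
--         return [d]
--     n = len(mat)
--     idx = {'S%d' % i: i for i in range(n)}
--     s0 = idx[d]
--     target = idx.get(a, -1)
--     banned = [False] * n
--     for name in ban: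
--         i = idx.get(name)
--         if i is not None:
--             banned[i] = True
--     parent = [-1] * n  # -1 = undiscovered; doubles as the visited marker
--     parent[s0] = s0
--     q = [s0]
--     qi = 0
--     while qi < len(q):
--         u = q[qi]
--         qi += 1
--         if u == target:
--             path = []
--             while u != s0:
--                 path.append('S%d' % u)
--                 u = parent[u]
--             path.append(d)
--             return path[::-1]
--         row = mat[u]
--         for v in range(n):
--             if row[v] == 1 and parent[v] == -1 and not banned[v]:
--                 parent[v] = u
--                 q.append(v)
--     return []
-- ===== Notes on version B (the rewrite author's own statement) =====
-- stated objective: alternative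
-- what changed: B abandons A's path-accumulating queue of (node, path-copy) pairs with a full queue-history rescan and adjacency rebuild per dequeued node: it maps vertex names to integer indices once, runs BFS over integers with a parent array that doubles as the visited marker (reading each matrix row directly), and reconstructs the answer path backwards through parent pointers only when the target is dequeued.
import Mathlib
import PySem

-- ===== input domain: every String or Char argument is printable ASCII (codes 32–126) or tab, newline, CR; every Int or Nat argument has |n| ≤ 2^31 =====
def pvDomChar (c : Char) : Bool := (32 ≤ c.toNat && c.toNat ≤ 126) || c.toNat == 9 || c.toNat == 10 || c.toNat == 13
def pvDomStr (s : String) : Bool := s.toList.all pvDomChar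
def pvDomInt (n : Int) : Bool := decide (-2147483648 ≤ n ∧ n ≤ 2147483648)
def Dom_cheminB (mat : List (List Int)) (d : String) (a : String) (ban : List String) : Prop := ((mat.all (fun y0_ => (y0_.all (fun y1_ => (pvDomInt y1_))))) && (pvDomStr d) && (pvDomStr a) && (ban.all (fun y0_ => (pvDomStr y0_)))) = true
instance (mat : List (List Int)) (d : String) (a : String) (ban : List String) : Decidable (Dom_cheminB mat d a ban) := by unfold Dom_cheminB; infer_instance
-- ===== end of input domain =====

-- B replaces A's path-accumulating queue of (name, path) pairs — with its per-step
-- adjacency rebuild and queue-history rescan — by an integer-index BFS with a parent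
-- array (doubling as the visited marker) and a single backward path reconstruction
-- (objective: alternative). Equivalence is about the return value; nothing is mutated.

-- ===== PORT A =====

-- f'S{i}' is 'S' + str(i); built on the List Char side to stay kernel-reducible.
def pvName (i : Int) : String := String.ofList ('S' :: PySem.Int.toChars i)

def pvSommets (n : Nat) : List String :=
  (PySem.List.pyRange 0 (n : Int) 1).map pvName

-- lireGraphe: dict {s: [] for s in sommets}, then nested loops appending sommets[j] to entry sommets[i]
-- when mat[i][j] == 1.  Indices i, j from range(len(mat)) are always valid for mat and sommets; mat[i][j]
-- raises IndexError when row i is shorter than len(mat) — Pre_ excludes those inputs (pyGetD default 0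
-- is unreachable inside Pre_).  The dict entry sommets[i] always exists, so Dict.modify = list.append.
def pvLireGraphe (mat : List (List Int)) : List String × PySem.Dict String (List String) :=
  let sommets := pvSommets mat.length
  let init : PySem.Dict String (List String) :=
    sommets.foldl (fun acc s => acc.insert s []) PySem.Dict.empty
  let g :=
    (PySem.List.pyRange 0 (mat.length : Int) 1).foldl (fun acc i =>
      (PySem.List.pyRange 0 (mat.length : Int) 1).foldl (fun acc2 j =>
        if PySem.List.pyGetD (PySem.List.pyGetD mat i []) j 0 == 1 then
          acc2.modify (PySem.List.pyGetD sommets i "") []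
            (fun l => l ++ [PySem.List.pyGetD sommets j ""])
        else acc2) acc) init
  (sommets, g)

-- graphes[S] raises KeyError when S is not a vertex; Pre_ excludes exactly those inputs
-- (there the `.getD []` default is what makes the port total).
def pvSuccesseurs (mat : List (List Int)) (S : String) (LF : List String) : List String :=
  let graphes := (pvLireGraphe mat).2
  ((graphes.get? S).getD []).filter (fun succ => !(LF.contains succ))

-- the while-loop of cheminB; `fuel` only makes the recursion total: the loop runs at most
-- len(Ls_final) ≤ len(mat)+1 iterations (queued heads are pairwise distinct vertices),
-- so fuel = len(mat)+2 is never exhausted.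
def pvLoopA (mat : List (List Int)) (a : String) (ban : List String)
    (Ls : List (String × List String)) (i : Nat) (fuel : Nat) : List String :=
  match fuel with
  | 0 => []
  | fuel + 1 =>
    if i < Ls.length then
      let sc := Ls.getD i ("", [])
      if sc.1 == a then sc.2
      else
        let dejaFait := Ls.map Prod.fst
        pvLoopA mat a ban
          (Ls ++ (pvSuccesseurs mat sc.1 (dejaFait ++ ban)).map (fun t => (t, sc.2 ++ [t])))
          (i + 1) fuel
    else []

def cheminB (mat : List (List Int)) (d : String) (a : String) (ban : List String) : List String :=
  pvLoopA mat a ban [(d, [d])] 0 (mat.length + 2)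

-- ===== PORT B =====

-- idx = {'S%d' % i: i for i in range(n)}
def pvIdx (n : Nat) : PySem.Dict String Int :=
  (PySem.List.pyRange 0 (n : Int) 1).foldl (fun acc i => acc.insert (pvName i) i) PySem.Dict.empty

-- banned = [False]*n; for name in ban: i = idx.get(name); if i is not None: banned[i] = True
-- (the stored i is always in range, so the in-place banned[i] = True is List.pySetD, exact)
def pvBanned (n : Nat) (ban : List String) : List Bool :=
  ban.foldl (fun arr s =>
    match (pvIdx n).get? s with
    | some i => PySem.List.pySetD arr i true
    | none => arr) (List.replicate n false)

-- the successor test of Source B's inner for-loop: row[v] == 1 and parent[v] == -1 and not banned[v]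
def pvCond (row : List Int) (banned : List Bool) (parent : List Int) (v : Int) : Bool :=
  PySem.List.pyGetD row v 0 == 1 && PySem.List.pyGetD parent v (-1) == -1
    && !(PySem.List.pyGetD banned v false)

-- the `while u != s0:` reconstruction loop; `fuel` only makes it total (a parent chain from a
-- visited node reaches s0 in < n steps, so fuel = n+1 is never exhausted inside Pre_).
def pvBuildPath (parent : List Int) (s0 : Int) : Nat → Int → List String → List String
  | 0, _, path => path
  | fuel + 1, u, path =>
    if u == s0 then path
    else pvBuildPath parent s0 fuel (PySem.List.pyGetD parent u (-1)) (path ++ [pvName u])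

-- the `while qi < len(q):` BFS loop of Source B; `fuel` only makes the recursion total
-- (q holds pairwise distinct vertices, so ≤ n+1 iterations happen; fuel = n+2 suffices).
def pvLoopBAlt (mat : List (List Int)) (n : Nat) (target s0 : Int) (d : String)
    (banned : List Bool) (parent : List Int) (q : List Int) (qi : Nat) (fuel : Nat) : List String :=
  match fuel with
  | 0 => []
  | fuel + 1 =>
    if qi < q.length then
      let u := q.getD qi 0
      if u == target then
        -- path = []; while u != s0: path.append('S%d'%u); u = parent[u]; path.append(d); return path[::-1]
        ((pvBuildPath parent s0 (n + 1) u []) ++ [d]).reverse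
      else
        let row := PySem.List.pyGetD mat u []
        let st := (PySem.List.pyRange 0 (n : Int) 1).foldl
          (fun (st : List Int × List Int) v =>
            if pvCond row banned st.1 v then (PySem.List.pySetD st.1 v u, st.2 ++ [v]) else st)
          (parent, q)
        pvLoopBAlt mat n target s0 d banned st.1 st.2 (qi + 1) fuel
    else []

def cheminB_alt (mat : List (List Int)) (d : String) (a : String) (ban : List String) : List String :=
  if d == a then [d]
  else
    -- n = len(mat); s0 = idx[d] raises KeyError when d is not a vertex — Pre_ excludes
    -- those inputs, the none branch is the total-izing default; target = idx.get(a, -1);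
    -- parent = [-1]*n; parent[s0] = s0 (s0 always in range, in-place assignment = pySetD)
    match (pvIdx mat.length).get? d with
    | none => []
    | some s0 =>
      pvLoopBAlt mat mat.length ((pvIdx mat.length).getD a (-1)) s0 d (pvBanned mat.length ban)
        (PySem.List.pySetD (List.replicate mat.length (-1 : Int)) s0 s0) [s0] 0 (mat.length + 2)

-- ===== PRECONDITION & SPEC =====

-- Pre_ excludes exactly the inputs on which Python A raises, all with d ≠ a: a ragged matrix
-- (a row shorter than len(mat) → IndexError in lireGraphe) or a start d that is not a vertex
-- name (KeyError in successeurs); with d == a both programs return [d] before reading mat.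
def Pre_cheminB (mat : List (List Int)) (d : String) (a : String) (ban : List String) : Prop :=
  d = a ∨ ((∀ row ∈ mat, mat.length ≤ row.length) ∧
    d ∈ (List.range mat.length).map (fun i => pvName (i : Int)))

instance (mat : List (List Int)) (d : String) (a : String) (ban : List String) :
    Decidable (Pre_cheminB mat d a ban) := by unfold Pre_cheminB; infer_instance

def pvWitness_cheminB : List (List Int) × String × String × List String :=
  ([[0, 1], [0, 0]], "S0", "S1", [])

def Spec_cheminB (mat : List (List Int)) (d : String) (a : String) (ban : List String)
    (out : List String) : Prop := out = cheminB_alt mat d a ban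

instance (mat : List (List Int)) (d : String) (a : String) (ban : List String) (out : List String) :
    Decidable (Spec_cheminB mat d a ban out) := by unfold Spec_cheminB; infer_instance

-- ===== CLAIM (what is proved, stated in full; the proofs are below) =====
def Claim_equal_cheminB : Prop := ∀ (mat : List (List Int)) (d : String) (a : String) (ban : List String), Dom_cheminB mat d a ban → Pre_cheminB mat d a ban → Spec_cheminB mat d a ban (cheminB mat d a ban)

-- ===== LEMMAS AND PROOFS =====

-- ---- digits: pvName is injective on nonnegative ints ----
def pvEvFrom (a : Nat) (l : List Char) : Nat := l.foldl (fun a c => 10 * a + (c.toNat - 48)) a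

lemma pvEvFrom_toDigitsCore : ∀ (fuel n : Nat), n < fuel → ∀ (a : Nat) (ds : List Char),
    ∃ P : Nat, pvEvFrom a (Nat.toDigitsCore 10 fuel n ds) = pvEvFrom (a * P + n) ds := by
  intro fuel
  induction fuel with
  | zero => intro n hn; omega
  | succ fuel ih =>
    intro n hn a ds
    show ∃ P, pvEvFrom a
      (if n / 10 = 0 then (n % 10).digitChar :: ds
       else Nat.toDigitsCore 10 fuel (n / 10) ((n % 10).digitChar :: ds)) = _
    have hd : ((n % 10).digitChar).toNat - 48 = n % 10 := by
      have h10 : n % 10 < 10 := Nat.mod_lt _ (by norm_num)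
      interval_cases h : n % 10 <;> simp [Nat.digitChar]
    by_cases h0 : n / 10 = 0
    · refine ⟨10, ?_⟩
      rw [if_pos h0]
      show pvEvFrom (10 * a + (((n % 10).digitChar).toNat - 48)) ds = _
      rw [hd]
      have hn10 : n % 10 = n := by omega
      rw [hn10]; ring_nf
    · rw [if_neg h0]
      have hlt : n / 10 < fuel := by
        have : n / 10 < n := Nat.div_lt_self (by omega) (by norm_num)
        omega
      obtain ⟨P, hP⟩ := ih (n / 10) hlt a ((n % 10).digitChar :: ds)
      refine ⟨10 * P, ?_⟩
      rw [hP]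
      show pvEvFrom (10 * (a * P + n / 10) + (((n % 10).digitChar).toNat - 48)) ds = _
      rw [hd]
      have harith : 10 * (a * P + n / 10) + n % 10 = a * (10 * P) + n := by
        have := Nat.div_add_mod n 10; ring_nf; omega
      rw [harith]

lemma pvEvFrom_toDigits (n : Nat) : pvEvFrom 0 (Nat.toDigits 10 n) = n := by
  obtain ⟨P, hP⟩ := pvEvFrom_toDigitsCore (n + 1) n (by omega) 0 []
  simpa [pvEvFrom] using hP

lemma pvToDigits_inj {m n : Nat} (h : Nat.toDigits 10 m = Nat.toDigits 10 n) : m = n := by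
  have hm := pvEvFrom_toDigits m
  rw [h, pvEvFrom_toDigits] at hm
  omega

lemma pvName_inj {i j : Int} (hi : 0 ≤ i) (hj : 0 ≤ j) (h : pvName i = pvName j) : i = j := by
  unfold pvName at h
  have hc : ('S' :: PySem.Int.toChars i) = ('S' :: PySem.Int.toChars j) := String.ofList_inj.mp h
  have h' : PySem.Int.toChars i = PySem.Int.toChars j := by simpa using hc
  unfold PySem.Int.toChars at h'
  rw [if_neg (by omega), if_neg (by omega)] at h'
  have := pvToDigits_inj h'
  omega

lemma pvSommets_nodup (n : Nat) : (pvSommets n).Nodup := by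
  unfold pvSommets
  refine List.Nodup.map_on ?_ (PySem.List.nodup_pyRange_one 0 (n : Int))
  intro i hi j hj hij
  have hi0 : 0 ≤ i := ((PySem.List.mem_pyRange_one).1 hi).1
  have hj0 : 0 ≤ j := ((PySem.List.mem_pyRange_one).1 hj).1
  exact pvName_inj hi0 hj0 hij

lemma pvSommets_length (n : Nat) : (pvSommets n).length = n := by
  unfold pvSommets
  simp [PySem.List.length_pyRange_one]

lemma pvSommets_get (n : Nat) (j : Int) (h0 : 0 ≤ j) (hn : j < n) :
    PySem.List.pyGetD (pvSommets n) j "" = pvName j := by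
  unfold pvSommets
  rw [PySem.List.pyGetD_map_pyRange_of_nonneg _ _ _ _ h0 (by exact_mod_cast hn)]

-- ---- generic find?: the unique satisfying element is found ----
lemma pvFind_unique {α : Type} (p : α → Bool) : ∀ (l : List α) (u : α), u ∈ l → p u = true →
    (∀ x ∈ l, p x = true → x = u) → l.find? p = some u := by
  intro l
  induction l with
  | nil => intro u hu; cases hu
  | cons x xs ih =>
    intro u hu hp huniq
    by_cases hx : p x = true
    · rw [List.find?_cons_of_pos hx]
      rw [huniq x List.mem_cons_self hx]
    · rw [List.find?_cons_of_neg hx]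
      have hu' : u ∈ xs := by
        cases hu with
        | head => exact absurd hp hx
        | tail _ h => exact h
      exact ih u hu' hp (fun y hy => huniq y (List.mem_cons_of_mem _ hy))

-- ---- pvIdx: dict lookup characterization ----
lemma pvGet?_foldl_insert (n : Nat) : ∀ (l : List Int),
    (l.map pvName).Nodup → ∀ (d0 : PySem.Dict String Int) (s : String),
    (l.foldl (fun acc i => acc.insert (pvName i) i) d0).get? s
      = (match l.find? (fun i => pvName i == s) with
         | some i => some i
         | none => d0.get? s) := by
  intro l
  induction l with
  | nil => intro _ d0 s; rfl
  | cons x xs ih =>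
    intro hnd d0 s
    rw [List.map_cons, List.nodup_cons] at hnd
    obtain ⟨hx, hxs⟩ := hnd
    simp only [List.foldl_cons]
    by_cases hks : pvName x = s
    · rw [List.find?_cons_of_pos (by simp [hks])]
      rw [ih hxs]
      have hnone : xs.find? (fun i => pvName i == s) = none := by
        rw [List.find?_eq_none]
        intro y hy
        simp only [beq_iff_eq]
        intro hys
        exact hx (by rw [← hks] at hys; exact hys ▸ List.mem_map_of_mem hy)
      rw [hnone, ← hks, PySem.Dict.get?_insert_self]
    · rw [List.find?_cons_of_neg (by simp [hks])]
      rw [ih hxs]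
      cases h : xs.find? (fun i => pvName i == s) with
      | some y => rfl
      | none => simp only []; rw [PySem.Dict.get?_insert_of_ne _ _ (fun h' => hks h'.symm)]

lemma pvIdx_nodup_names (n : Nat) :
    (((PySem.List.pyRange 0 (n : Int) 1)).map pvName).Nodup := pvSommets_nodup n

lemma pvIdx_get?_name (n : Nat) (t : Int) (h0 : 0 ≤ t) (hn : t < n) :
    (pvIdx n).get? (pvName t) = some t := by
  unfold pvIdx
  rw [pvGet?_foldl_insert n _ (pvIdx_nodup_names n)]
  have hfind : (PySem.List.pyRange 0 (n : Int) 1).find? (fun i => pvName i == pvName t) = some t := by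
    refine pvFind_unique _ _ t ?_ (by simp) ?_
    · rw [PySem.List.mem_pyRange_one]; exact ⟨h0, by exact_mod_cast hn⟩
    · intro x hx hpx
      have hx0 : 0 ≤ x := ((PySem.List.mem_pyRange_one).1 hx).1
      exact pvName_inj hx0 h0 (by simpa using hpx)
  rw [hfind]

lemma pvIdx_get?_some (n : Nat) (s : String) (v : Int) (h : (pvIdx n).get? s = some v) :
    0 ≤ v ∧ v < n ∧ s = pvName v := by
  unfold pvIdx at h
  rw [pvGet?_foldl_insert n _ (pvIdx_nodup_names n)] at h
  cases hf : (PySem.List.pyRange 0 (n : Int) 1).find? (fun i => pvName i == s) with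
  | none => rw [hf] at h; simp [PySem.Dict.get?_empty] at h
  | some i =>
    rw [hf] at h
    have hi := List.mem_of_find?_eq_some hf
    have hpi : pvName i = s := by simpa using List.find?_some hf
    obtain ⟨hi0, hin⟩ := (PySem.List.mem_pyRange_one).1 hi
    cases h
    exact ⟨hi0, by exact_mod_cast hin, hpi.symm⟩

-- the dequeue test: u == target decides pvName u == a, for u a vertex index
lemma pvTarget_eq (n : Nat) (a : String) (u : Int) (h0 : 0 ≤ u) (hn : u < n) :
    (pvName u == a) = (u == (pvIdx n).getD a (-1)) := by
  rw [PySem.Dict.getD_eq_get?_getD]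
  cases h : (pvIdx n).get? a with
  | none =>
    have hne : pvName u ≠ a := by
      intro he
      rw [← he, pvIdx_get?_name n u h0 hn] at h
      cases h
    simp only [Option.getD]
    have : u ≠ (-1 : Int) := by omega
    simp [hne, this]
  | some t =>
    obtain ⟨ht0, htn, ha⟩ := pvIdx_get?_some n a t h
    simp only [Option.getD]
    by_cases he : u = t
    · subst he; simp [ha]
    · have : pvName u ≠ a := by
        rw [ha]; intro hc; exact he (pvName_inj h0 ht0 hc)
      simp [this, he]

-- ---- small list-indexing helpers (all indices nonnegative and in range) ----
lemma pvGet_set (xs : List Int) (k j u : Int) (hk0 : 0 ≤ k) (hkl : k < xs.length)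
    (hj0 : 0 ≤ j) (hjl : j < xs.length) :
    PySem.List.pyGetD (PySem.List.pySetD xs k u) j (-1)
      = if j = k then u else PySem.List.pyGetD xs j (-1) := by
  rw [PySem.List.pySetD_of_nonneg _ _ hk0]
  rw [PySem.List.pyGetD_eq_getElem _ _ hj0 (by simpa using hjl),
      PySem.List.pyGetD_eq_getElem _ _ hj0 hjl]
  rw [List.getElem_set]
  have : k.toNat = j.toNat ↔ j = k := by omega
  split_ifs with h1 h2 h2 <;> first | rfl | (exfalso; omega)

lemma pvGet_set_bool (xs : List Bool) (k j : Int) (u : Bool) (hk0 : 0 ≤ k) (hkl : k < xs.length)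
    (hj0 : 0 ≤ j) (hjl : j < xs.length) :
    PySem.List.pyGetD (PySem.List.pySetD xs k u) j false
      = if j = k then u else PySem.List.pyGetD xs j false := by
  rw [PySem.List.pySetD_of_nonneg _ _ hk0]
  rw [PySem.List.pyGetD_eq_getElem _ _ hj0 (by simpa using hjl),
      PySem.List.pyGetD_eq_getElem _ _ hj0 hjl]
  rw [List.getElem_set]
  have : k.toNat = j.toNat ↔ j = k := by omega
  split_ifs with h1 h2 h2 <;> first | rfl | (exfalso; omega)

-- count of visited entries; a fresh assignment increments it
def pvCountVis (parent : List Int) : Nat := parent.countP (fun x => x != -1)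

lemma pvCountVis_le (parent : List Int) : pvCountVis parent ≤ parent.length :=
  List.countP_le_length

lemma pvCountVis_set (parent : List Int) (k u : Int) (hk0 : 0 ≤ k) (hkl : k < parent.length)
    (hfresh : PySem.List.pyGetD parent k (-1) = -1) (hu : u ≠ -1) :
    pvCountVis (PySem.List.pySetD parent k u) = pvCountVis parent + 1 := by
  rw [PySem.List.pySetD_of_nonneg _ _ hk0]
  have hkn : k.toNat < parent.length := by omega
  have hgk : parent[k.toNat] = -1 := by
    rw [PySem.List.pyGetD_eq_getElem _ _ hk0 hkl] at hfresh
    exact hfresh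
  have hsplit : parent = parent.take k.toNat ++ parent[k.toNat] :: parent.drop (k.toNat + 1) := by
    conv_lhs => rw [← List.take_append_drop k.toNat parent]
    congr 1
    exact (List.getElem_cons_drop hkn).symm
  unfold pvCountVis
  rw [List.set_eq_take_append_cons_drop, if_pos hkn]
  conv_rhs => rw [hsplit]
  rw [List.countP_append, List.countP_append, List.countP_cons, List.countP_cons]
  simp [hgk, hu]
  omega

-- parent-chain iteration (proof-side)
def pvIter (parent : List Int) : Nat → Int → Int
  | 0, v => v
  | m + 1, v => pvIter parent m (PySem.List.pyGetD parent v (-1))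

-- closure: from a visited vertex, one parent step stays visited and in range
def pvClosed (n : Nat) (parent : List Int) : Prop :=
  ∀ v : Int, 0 ≤ v → v < n → PySem.List.pyGetD parent v (-1) ≠ -1 →
    0 ≤ PySem.List.pyGetD parent v (-1) ∧ PySem.List.pyGetD parent v (-1) < n ∧
      PySem.List.pyGetD parent (PySem.List.pyGetD parent v (-1)) (-1) ≠ -1

-- ---- pvBuildPath: accumulator, fuel-irrelevance, stability under a fresh assignment ----
lemma pvBuild_acc (parent : List Int) (s0 : Int) :
    ∀ (f : Nat) (x : Int) (acc : List String),
      pvBuildPath parent s0 f x acc = acc ++ pvBuildPath parent s0 f x [] := by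
  intro f
  induction f with
  | zero => intro x acc; simp [pvBuildPath]
  | succ f ih =>
    intro x acc
    show pvBuildPath parent s0 (f+1) x acc = _
    rw [pvBuildPath, pvBuildPath]
    by_cases hx : (x == s0) = true
    · simp [hx]
    · rw [if_neg hx, if_neg hx, ih _ (acc ++ [pvName x]),
        ih _ ([] ++ [pvName x])]
      simp

lemma pvBuild_fuel (parent : List Int) (s0 : Int) :
    ∀ (m : Nat) (x : Int) (f g : Nat) (acc : List String), pvIter parent m x = s0 →
      m < f → m < g → pvBuildPath parent s0 f x acc = pvBuildPath parent s0 g x acc := by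
  intro m
  induction m with
  | zero =>
    intro x f g acc hit hf hg
    obtain ⟨f', rfl⟩ : ∃ f', f = f' + 1 := ⟨f - 1, by omega⟩
    obtain ⟨g', rfl⟩ : ∃ g', g = g' + 1 := ⟨g - 1, by omega⟩
    have hx : x = s0 := hit
    rw [pvBuildPath, pvBuildPath]
    simp [hx]
  | succ m ih =>
    intro x f g acc hit hf hg
    obtain ⟨f', rfl⟩ : ∃ f', f = f' + 1 := ⟨f - 1, by omega⟩
    obtain ⟨g', rfl⟩ : ∃ g', g = g' + 1 := ⟨g - 1, by omega⟩
    rw [pvBuildPath, pvBuildPath]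
    by_cases hx : (x == s0) = true
    · simp [hx]
    · rw [if_neg hx, if_neg hx]
      exact ih _ f' g' _ hit (by omega) (by omega)

lemma pvBuild_stable (n : Nat) (parent : List Int) (hlen : parent.length = n)
    (hcl : pvClosed n parent) (s0 j u' : Int) (hj0 : 0 ≤ j) (hjn : j < n)
    (hfresh : PySem.List.pyGetD parent j (-1) = -1) :
    ∀ (f : Nat) (x : Int) (acc : List String), 0 ≤ x → x < n →
      PySem.List.pyGetD parent x (-1) ≠ -1 →
      pvBuildPath (PySem.List.pySetD parent j u') s0 f x acc = pvBuildPath parent s0 f x acc := by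
  intro f
  induction f with
  | zero => intro x acc _ _ _; rfl
  | succ f ih =>
    intro x acc hx0 hxn hvis
    rw [pvBuildPath, pvBuildPath]
    by_cases hx : (x == s0) = true
    · simp [hx]
    · rw [if_neg hx, if_neg hx]
      have hxj : x ≠ j := by
        intro he; rw [he] at hvis; exact hvis hfresh
      have hget : PySem.List.pyGetD (PySem.List.pySetD parent j u') x (-1)
          = PySem.List.pyGetD parent x (-1) := by
        rw [pvGet_set parent j x u' hj0 (by omega) hx0 (by omega), if_neg hxj]
      rw [hget]
      obtain ⟨h1, h2, h3⟩ := hcl x hx0 hxn hvis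
      exact ih _ _ h1 h2 h3

lemma pvIter_stable (n : Nat) (parent : List Int) (hlen : parent.length = n)
    (hcl : pvClosed n parent) (j u' : Int) (hj0 : 0 ≤ j) (hjn : j < n)
    (hfresh : PySem.List.pyGetD parent j (-1) = -1) :
    ∀ (m : Nat) (x : Int), 0 ≤ x → x < n → PySem.List.pyGetD parent x (-1) ≠ -1 →
      pvIter (PySem.List.pySetD parent j u') m x = pvIter parent m x := by
  intro m
  induction m with
  | zero => intro x _ _ _; rfl
  | succ m ih =>
    intro x hx0 hxn hvis
    have hxj : x ≠ j := by intro he; rw [he] at hvis; exact hvis hfresh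
    show pvIter _ m _ = pvIter parent m _
    have hget : PySem.List.pyGetD (PySem.List.pySetD parent j u') x (-1)
        = PySem.List.pyGetD parent x (-1) := by
      rw [pvGet_set parent j x u' hj0 (by omega) hx0 (by omega), if_neg hxj]
    rw [hget]
    obtain ⟨h1, h2, h3⟩ := hcl x hx0 hxn hvis
    exact ih _ h1 h2 h3

-- ---- the banned array realizes membership in ban ----
lemma pvBanned_spec (n : Nat) (ban : List String) :
    ∀ (arr : List Bool), arr.length = n →
      ((ban.foldl (fun arr s =>
        match (pvIdx n).get? s with
        | some i => PySem.List.pySetD arr i true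
        | none => arr) arr).length = n ∧
      ∀ v : Int, 0 ≤ v → v < n →
        PySem.List.pyGetD (ban.foldl (fun arr s =>
          match (pvIdx n).get? s with
          | some i => PySem.List.pySetD arr i true
          | none => arr) arr) v false
        = (PySem.List.pyGetD arr v false || decide (pvName v ∈ ban))) := by
  induction ban with
  | nil => intro arr hlen; exact ⟨hlen, by simp⟩
  | cons s rest ih =>
    intro arr hlen
    simp only [List.foldl_cons]
    cases hge : (pvIdx n).get? s with
    | none =>
      obtain ⟨hl, hv⟩ := ih arr hlen
      refine ⟨hl, ?_⟩
      intro v hv0 hvn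
      rw [hv v hv0 hvn]
      have hns : pvName v ≠ s := by
        intro he; rw [← he, pvIdx_get?_name n v hv0 hvn] at hge; cases hge
      simp [List.mem_cons, hns]
    | some i =>
      obtain ⟨hi0, hin, hsi⟩ := pvIdx_get?_some n s i hge
      have hlen' : (PySem.List.pySetD arr i true).length = n := by
        rw [PySem.List.pySetD_of_nonneg _ _ hi0]; simpa using hlen
      obtain ⟨hl, hv⟩ := ih _ hlen'
      refine ⟨hl, ?_⟩
      intro v hv0 hvn
      rw [hv v hv0 hvn]
      rw [pvGet_set_bool arr i v true hi0 (by omega) hv0 (by omega)]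
      by_cases he : v = i
      · subst he
        simp [List.mem_cons, hsi]
      · have hns : pvName v ≠ s := by
          rw [hsi]; intro hc; exact he (pvName_inj hv0 hi0 hc)
        simp [List.mem_cons, hns, he]

-- ---- A's adjacency: characterize the dict built by lireGraphe ----
lemma pvGetD_foldl_insert_nilval : ∀ (l : List String) (d : PySem.Dict String (List String)),
    (∀ s, d.getD s [] = []) →
    ∀ s, (l.foldl (fun acc x => acc.insert x ([] : List String)) d).getD s [] = [] := by
  intro l
  induction l with
  | nil => intro d hd s; exact hd s
  | cons x xs ih =>
    intro d hd s
    simp only [List.foldl_cons]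
    refine ih _ ?_ s
    intro s'
    rw [PySem.Dict.getD_insert]
    split_ifs with h
    · rfl
    · exact hd s'

lemma pvGetD_inner (mat : List (List Int)) (i : Int) :
    ∀ (js : List Int) (g : PySem.Dict String (List String)) (s : String),
    (js.foldl (fun acc2 j =>
        if PySem.List.pyGetD (PySem.List.pyGetD mat i []) j 0 == 1 then
          acc2.modify (PySem.List.pyGetD (pvSommets mat.length) i "") []
            (fun l => l ++ [PySem.List.pyGetD (pvSommets mat.length) j ""])
        else acc2) g).getD s []
      = if s = PySem.List.pyGetD (pvSommets mat.length) i "" then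
          g.getD (PySem.List.pyGetD (pvSommets mat.length) i "") [] ++
            ((js.filter (fun j => PySem.List.pyGetD (PySem.List.pyGetD mat i []) j 0 == 1)).map
              (fun j => PySem.List.pyGetD (pvSommets mat.length) j ""))
        else g.getD s [] := by
  intro js
  induction js with
  | nil =>
    intro g s
    simp only [List.foldl_nil, List.filter_nil, List.map_nil, List.append_nil]
    split_ifs with h
    · rw [h]
    · rfl
  | cons j js ih =>
    intro g s
    simp only [List.foldl_cons, List.filter_cons]
    by_cases hc : (PySem.List.pyGetD (PySem.List.pyGetD mat i []) j 0 == 1) = true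
    · rw [if_pos hc, if_pos hc, ih]
      split_ifs with hs
      · subst hs
        rw [PySem.Dict.getD_modify_self]
        simp
      · rw [PySem.Dict.getD_modify_of_ne _ _ _ hs]
    · rw [if_neg hc, if_neg hc, ih]

lemma pvGetD_outer (mat : List (List Int)) :
    ∀ (is : List Int), (is.map (fun i => PySem.List.pyGetD (pvSommets mat.length) i "")).Nodup →
      ∀ (g : PySem.Dict String (List String)) (s : String),
    (is.foldl (fun acc i =>
        (PySem.List.pyRange 0 (mat.length : Int) 1).foldl (fun acc2 j =>
          if PySem.List.pyGetD (PySem.List.pyGetD mat i []) j 0 == 1 then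
            acc2.modify (PySem.List.pyGetD (pvSommets mat.length) i "") []
              (fun l => l ++ [PySem.List.pyGetD (pvSommets mat.length) j ""])
          else acc2) acc) g).getD s []
      = (match is.find? (fun i => PySem.List.pyGetD (pvSommets mat.length) i "" == s) with
         | some i => g.getD (PySem.List.pyGetD (pvSommets mat.length) i "") [] ++
             ((PySem.List.pyRange 0 (mat.length : Int) 1).filter
                (fun j => PySem.List.pyGetD (PySem.List.pyGetD mat i []) j 0 == 1)).map
              (fun j => PySem.List.pyGetD (pvSommets mat.length) j "")
         | none => g.getD s []) := by
  intro is
  induction is with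
  | nil => intro _ g s; rfl
  | cons i is ih =>
    intro hnd g s
    rw [List.map_cons, List.nodup_cons] at hnd
    obtain ⟨hni, hnd'⟩ := hnd
    simp only [List.foldl_cons]
    rw [ih hnd']
    by_cases hs : PySem.List.pyGetD (pvSommets mat.length) i "" = s
    · rw [List.find?_cons_of_pos (by simp [hs])]
      have hnone : is.find? (fun i' => PySem.List.pyGetD (pvSommets mat.length) i' "" == s) = none := by
        rw [List.find?_eq_none]
        intro i' hi'
        simp only [beq_iff_eq]
        intro h'
        exact hni (by rw [← hs] at h'; exact h' ▸ List.mem_map_of_mem hi')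
      rw [hnone]
      simp only []
      rw [pvGetD_inner, if_pos hs.symm]
    · rw [List.find?_cons_of_neg (by simp [hs])]
      cases h : is.find? (fun i' => PySem.List.pyGetD (pvSommets mat.length) i' "" == s) with
      | none =>
        simp only []
        rw [pvGetD_inner, if_neg (fun h' => hs h'.symm)]
      | some i' =>
        have hi' : PySem.List.pyGetD (pvSommets mat.length) i' "" = s := by
          simpa using List.find?_some h
        simp only []
        rw [pvGetD_inner, if_neg (by rw [hi']; exact fun h' => hs h'.symm)]

-- the adjacency row of vertex u, as A's dict lookup
lemma pvAdjA (mat : List (List Int)) (u : Int) (h0 : 0 ≤ u) (hn : u < mat.length) :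
    ((pvLireGraphe mat).2.get? (pvName u)).getD []
      = ((PySem.List.pyRange 0 (mat.length : Int) 1).filter
          (fun j => PySem.List.pyGetD (PySem.List.pyGetD mat u []) j 0 == 1)).map
          (fun j => PySem.List.pyGetD (pvSommets mat.length) j "") := by
  rw [← PySem.Dict.getD_eq_get?_getD]
  have hmap : (PySem.List.pyRange 0 ((mat.length : Nat) : Int) 1).map
      (fun i => PySem.List.pyGetD (pvSommets mat.length) i "") = pvSommets mat.length := by
    have h := PySem.List.map_pyGetD_pyRange_zero (pvSommets mat.length) ""
    rwa [PySem.List.len, pvSommets_length] at h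
  have hnd : ((PySem.List.pyRange 0 (mat.length : Int) 1).map
      (fun i => PySem.List.pyGetD (pvSommets mat.length) i "")).Nodup := by
    rw [hmap]; exact pvSommets_nodup mat.length
  show ((pvLireGraphe mat).2).getD (pvName u) [] = _
  unfold pvLireGraphe
  simp only []
  rw [pvGetD_outer mat _ hnd]
  have hfind : (PySem.List.pyRange 0 (mat.length : Int) 1).find?
      (fun i => PySem.List.pyGetD (pvSommets mat.length) i "" == pvName u) = some u := by
    refine pvFind_unique _ _ u ?_ ?_ ?_
    · rw [PySem.List.mem_pyRange_one]; exact ⟨h0, by exact_mod_cast hn⟩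
    · rw [pvSommets_get _ _ h0 hn]; simp
    · intro x hx hpx
      obtain ⟨hx0, hxn⟩ := (PySem.List.mem_pyRange_one).1 hx
      rw [pvSommets_get _ _ hx0 (by exact_mod_cast hxn)] at hpx
      exact pvName_inj hx0 h0 (by simpa using hpx)
  rw [hfind]
  simp only []
  have hinit : ∀ s', ((pvSommets mat.length).foldl
      (fun acc x => acc.insert x ([] : List String)) PySem.Dict.empty).getD s' [] = [] :=
    pvGetD_foldl_insert_nilval _ _ (fun s' => PySem.Dict.getD_empty s' [])
  rw [hinit]
  simp

-- ---- the BFS invariant tying A's queue of (name, path) pairs to B's parent array ----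
structure pvInv (mat : List (List Int)) (n : Nat) (s0 : Int) (d : String) (ban : List String)
    (Ls : List (String × List String)) (parent : List Int) (q : List Int) : Prop where
  hlen : parent.length = n
  hs00 : 0 ≤ s0
  hs0n : s0 < n
  hs0self : PySem.List.pyGetD parent s0 (-1) = s0
  hs0name : pvName s0 = d
  hql : Ls.length = q.length
  hentry : ∀ k (hkL : k < Ls.length) (hkq : k < q.length), 0 ≤ q[k] ∧ q[k] < n ∧
      Ls[k].1 = pvName q[k] ∧
      Ls[k].2 = ((pvBuildPath parent s0 (n + 1) q[k] []) ++ [d]).reverse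
  hvisname : ∀ v : Int, 0 ≤ v → v < n →
      (PySem.List.pyGetD parent v (-1) ≠ -1 ↔ pvName v ∈ Ls.map Prod.fst)
  hreach : ∀ v : Int, 0 ≤ v → v < n → PySem.List.pyGetD parent v (-1) ≠ -1 →
      ∃ m, m + 1 ≤ pvCountVis parent ∧ pvIter parent m v = s0
  hclosed : pvClosed n parent

-- one accepted successor j of the dequeued vertex u extends the invariant
lemma pvInv_extend (mat : List (List Int)) (n : Nat) (s0 : Int) (d : String) (ban : List String)
    (Ls : List (String × List String)) (parent : List Int) (q : List Int)
    (inv : pvInv mat n s0 d ban Ls parent q)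
    (u j : Int) (hu0 : 0 ≤ u) (hun : u < n) (huvis : PySem.List.pyGetD parent u (-1) ≠ -1)
    (hj0 : 0 ≤ j) (hjn : j < n) (hfresh : PySem.List.pyGetD parent j (-1) = -1)
    (C : List String) (hC : C = ((pvBuildPath parent s0 (n + 1) u []) ++ [d]).reverse) :
    pvInv mat n s0 d ban (Ls ++ [(pvName j, C ++ [pvName j])])
      (PySem.List.pySetD parent j u) (q ++ [j]) := by
  obtain ⟨hlen, hs00, hs0n, hs0self, hs0name, hql, hentry, hvisname, hreach, hclosed⟩ := inv
  have hjl : j < parent.length := by omega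
  have hul : u < parent.length := by omega
  have hget : ∀ x : Int, 0 ≤ x → x < n →
      PySem.List.pyGetD (PySem.List.pySetD parent j u) x (-1)
        = if x = j then u else PySem.List.pyGetD parent x (-1) := by
    intro x hx0 hxn
    exact pvGet_set parent j x u hj0 hjl hx0 (by omega)
  have hjs0 : j ≠ s0 := by
    intro he; rw [he, hs0self] at hfresh; omega
  have hclosed' : pvClosed n (PySem.List.pySetD parent j u) := by
    intro v hv0 hvn hvvis
    rw [hget v hv0 hvn] at hvvis ⊢
    by_cases hvj : v = j
    · rw [if_pos hvj]
      refine ⟨hu0, hun, ?_⟩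
      rw [hget u hu0 hun]
      split_ifs with h
      · omega
      · exact huvis
    · rw [if_neg hvj] at hvvis ⊢
      obtain ⟨h1, h2, h3⟩ := hclosed v hv0 hvn hvvis
      refine ⟨h1, h2, ?_⟩
      rw [hget _ h1 h2]
      split_ifs with h
      · omega
      · exact h3
  -- reach bound for u, needed for the fuel argument below
  obtain ⟨mu, hmu, hmuit⟩ := hreach u hu0 hun huvis
  have hcnt : pvCountVis parent ≤ n := by
    have := pvCountVis_le parent; omega
  -- value of the new entry's reconstruction
  have hnewpath : pvBuildPath (PySem.List.pySetD parent j u) s0 (n + 1) j []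
      = [pvName j] ++ pvBuildPath parent s0 (n + 1) u [] := by
    have hn1 : n + 1 = (n) + 1 := rfl
    rw [pvBuildPath]
    have hjne : (j == s0) = false := by simp [hjs0]
    rw [if_neg (by simp [hjs0])]
    rw [hget j hj0 hjn, if_pos rfl]
    rw [pvBuild_acc]
    congr 1
    rw [pvBuild_stable n parent hlen hclosed s0 j u hj0 hjn hfresh n u [] hu0 hun huvis]
    exact pvBuild_fuel parent s0 mu u n (n + 1) [] hmuit (by omega) (by omega)
  constructor
  · rw [PySem.List.pySetD_of_nonneg _ _ hj0]; simpa using hlen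
  · exact hs00
  · exact hs0n
  · rw [hget s0 hs00 hs0n, if_neg (fun h => hjs0 h.symm)]; exact hs0self
  · exact hs0name
  · simp [hql]
  · -- entries
    intro k hkL hkq
    have hk : k < q.length + 1 := by simpa using hkq
    by_cases hko : k < q.length
    · have hqk : (q ++ [j])[k]'(by simp; omega) = q[k] := by
        rw [List.getElem_append_left hko]
      have hLk : ((Ls ++ [(pvName j, C ++ [pvName j])])[k]'(by simp; omega)) = Ls[k]'(by omega) := by
        rw [List.getElem_append_left (by omega)]
      obtain ⟨h1, h2, h3, h4⟩ := hentry k (by omega) hko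
      rw [hqk, hLk]
      refine ⟨h1, h2, h3, ?_⟩
      rw [h4]
      congr 2
      have hkvis : PySem.List.pyGetD parent q[k] (-1) ≠ -1 := by
        rw [hvisname q[k] h1 h2]
        rw [← h3]
        exact List.mem_map_of_mem (List.getElem_mem _)
      exact (pvBuild_stable n parent hlen hclosed s0 j u hj0 hjn hfresh (n+1) q[k] [] h1 h2 hkvis).symm
    · have hke : k = q.length := by omega
      subst hke
      have hqk : (q ++ [j])[q.length]'(by simp) = j := by
        rw [List.getElem_append_right (by omega)]; simp
      have hLk : ((Ls ++ [(pvName j, C ++ [pvName j])])[q.length]'(by simp; omega))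
          = (pvName j, C ++ [pvName j]) := by
        rw [List.getElem_append_right (by omega)]
        simp [hql]
      rw [hqk, hLk]
      refine ⟨hj0, hjn, rfl, ?_⟩
      rw [hnewpath, hC]
      simp
  · -- visited names
    intro v hv0 hvn
    rw [hget v hv0 hvn, List.map_append]
    by_cases hvj : v = j
    · subst hvj
      rw [if_pos rfl]
      constructor
      · intro _; simp
      · intro _; omega
    · rw [if_neg hvj]
      rw [hvisname v hv0 hvn]
      simp only [List.map_cons, List.map_nil, List.mem_append, List.mem_singleton]
      constructor
      · intro h; exact Or.inl h
      · intro h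
        cases h with
        | inl h => exact h
        | inr h => exact absurd (pvName_inj hv0 hj0 h) hvj
  · -- reach
    intro v hv0 hvn hvvis
    have hcnt' : pvCountVis (PySem.List.pySetD parent j u) = pvCountVis parent + 1 :=
      pvCountVis_set parent j u hj0 hjl hfresh (by omega)
    rw [hget v hv0 hvn] at hvvis
    by_cases hvj : v = j
    · refine ⟨mu + 1, by omega, ?_⟩
      show pvIter _ mu (PySem.List.pyGetD (PySem.List.pySetD parent j u) v (-1)) = s0
      rw [hvj, hget j hj0 hjn, if_pos rfl]
      rw [pvIter_stable n parent hlen hclosed j u hj0 hjn hfresh mu u hu0 hun huvis]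
      exact hmuit
    · rw [if_neg hvj] at hvvis
      obtain ⟨m, hm, hmit⟩ := hreach v hv0 hvn hvvis
      refine ⟨m, by omega, ?_⟩
      rw [pvIter_stable n parent hlen hclosed j u hj0 hjn hfresh m v hv0 hvn hvvis]
      exact hmit
  · exact hclosed'

-- ---- the inner for-loop over range(n): lockstep with A's successor append ----
lemma pvInnerFold (mat : List (List Int)) (n : Nat) (s0 : Int) (d : String) (ban : List String)
    (u : Int) (hu0 : 0 ≤ u) (hun : u < n) (row : List Int) (banned : List Bool) :
    ∀ (l : List Int), l.Nodup → (∀ j ∈ l, 0 ≤ j ∧ j < n) →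
      ∀ (parent : List Int) (q : List Int) (Ls : List (String × List String)) (C : List String),
      pvInv mat n s0 d ban Ls parent q →
      PySem.List.pyGetD parent u (-1) ≠ -1 →
      C = ((pvBuildPath parent s0 (n + 1) u []) ++ [d]).reverse →
      (l.foldl (fun (st : List Int × List Int) v =>
          if pvCond row banned st.1 v then (PySem.List.pySetD st.1 v u, st.2 ++ [v]) else st)
        (parent, q)).2
        = q ++ l.filter (pvCond row banned parent) ∧
      pvInv mat n s0 d ban
        (Ls ++ (l.filter (pvCond row banned parent)).map (fun j => (pvName j, C ++ [pvName j])))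
        (l.foldl (fun (st : List Int × List Int) v =>
          if pvCond row banned st.1 v then (PySem.List.pySetD st.1 v u, st.2 ++ [v]) else st)
          (parent, q)).1
        (l.foldl (fun (st : List Int × List Int) v =>
          if pvCond row banned st.1 v then (PySem.List.pySetD st.1 v u, st.2 ++ [v]) else st)
          (parent, q)).2 := by
  intro l
  induction l with
  | nil =>
    intro _ _ parent q Ls C inv _ _
    refine ⟨by simp, ?_⟩
    simpa using inv
  | cons j rest ih =>
    intro hnd hbnd parent q Ls C inv huvis hC
    rw [List.nodup_cons] at hnd
    obtain ⟨hjrest, hndrest⟩ := hnd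
    obtain ⟨hj0, hjn⟩ := hbnd j List.mem_cons_self
    have hbnd' : ∀ x ∈ rest, 0 ≤ x ∧ x < n := fun x hx => hbnd x (List.mem_cons_of_mem _ hx)
    simp only [List.foldl_cons, List.filter_cons]
    by_cases hc : pvCond row banned parent j = true
    · rw [if_pos hc, if_pos hc]
      have hfresh : PySem.List.pyGetD parent j (-1) = -1 := by
        unfold pvCond at hc
        simp only [Bool.and_eq_true, beq_iff_eq] at hc
        exact hc.1.2
      have inv' := pvInv_extend mat n s0 d ban Ls parent q inv u j hu0 hun huvis hj0 hjn hfresh C hC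
      have huvis' : PySem.List.pyGetD (PySem.List.pySetD parent j u) u (-1) ≠ -1 := by
        rw [pvGet_set parent j u u hj0 (by have := inv.hlen; omega) hu0 (by have := inv.hlen; omega)]
        split_ifs with h
        · omega
        · exact huvis
      have hC' : C = ((pvBuildPath (PySem.List.pySetD parent j u) s0 (n + 1) u []) ++ [d]).reverse := by
        rw [pvBuild_stable n parent inv.hlen inv.hclosed s0 j u hj0 hjn hfresh (n+1) u [] hu0 hun huvis]
        exact hC
      obtain ⟨hq, hinv⟩ := ih hndrest hbnd' (PySem.List.pySetD parent j u) (q ++ [j])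
        (Ls ++ [(pvName j, C ++ [pvName j])]) C inv' huvis' hC'
      -- the remaining tests are unchanged by the assignment at j (j ∉ rest)
      have hfilter : rest.filter (pvCond row banned (PySem.List.pySetD parent j u))
          = rest.filter (pvCond row banned parent) := by
        apply List.filter_congr
        intro x hx
        obtain ⟨hx0, hxn⟩ := hbnd' x hx
        have hxj : x ≠ j := fun he => hjrest (he ▸ hx)
        unfold pvCond
        rw [pvGet_set parent j x u hj0 (by rw [inv.hlen]; omega) hx0 (by rw [inv.hlen]; omega),
          if_neg hxj]
      rw [hfilter] at hq hinv
      constructor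
      · rw [hq]; simp
      · have : Ls ++ [(pvName j, C ++ [pvName j])]
            ++ (rest.filter (pvCond row banned parent)).map (fun j' => (pvName j', C ++ [pvName j']))
            = Ls ++ ((j :: rest.filter (pvCond row banned parent)).map
                (fun j' => (pvName j', C ++ [pvName j']))) := by
          simp
        rw [this] at hinv
        exact hinv
    · rw [if_neg hc, if_neg hc]
      exact ih hndrest hbnd' parent q Ls C inv huvis hC

-- filtered range of indices mapped to names = A's filtered successor name list
lemma pvSucc_eq (mat : List (List Int)) (n : Nat) (hn : n = mat.length) (s0 : Int) (d : String)
    (ban : List String) (Ls : List (String × List String)) (parent : List Int) (q : List Int)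
    (inv : pvInv mat n s0 d ban Ls parent q) (u : Int) (hu0 : 0 ≤ u) (hun : u < n) :
    pvSuccesseurs mat (pvName u) (Ls.map Prod.fst ++ ban)
      = ((PySem.List.pyRange 0 (n : Int) 1).filter
          (pvCond (PySem.List.pyGetD mat u []) (pvBanned n ban) parent)).map pvName := by
  unfold pvSuccesseurs
  simp only []
  rw [pvAdjA mat u hu0 (by omega)]
  rw [← hn]
  rw [List.filter_map, List.filter_filter]
  have hfilt : (PySem.List.pyRange 0 (n : Int) 1).filter
        (fun a => ((fun succ => !((Ls.map Prod.fst ++ ban).contains succ)) ∘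
            (fun j => PySem.List.pyGetD (pvSommets n) j "")) a &&
          (PySem.List.pyGetD (PySem.List.pyGetD mat u []) a 0 == 1))
      = (PySem.List.pyRange 0 (n : Int) 1).filter
          (pvCond (PySem.List.pyGetD mat u []) (pvBanned n ban) parent) := by
    apply List.filter_congr
    intro j hj
    obtain ⟨hj0, hjn'⟩ := (PySem.List.mem_pyRange_one).1 hj
    have hjn : j < n := by exact_mod_cast hjn'
    simp only [Function.comp]
    rw [pvSommets_get n j hj0 hjn]
    have hbspec := (pvBanned_spec n ban (List.replicate n false) (by simp)).2 j hj0 hjn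
    have hrep : PySem.List.pyGetD (List.replicate n false) j false = false := by
      rw [PySem.List.pyGetD_eq_getElem _ _ hj0 (by simpa using hjn)]
      simp
    rw [hrep] at hbspec
    have hvn := inv.hvisname j hj0 hjn
    have hvb : (PySem.List.pyGetD parent j (-1) == -1)
        = !(decide (pvName j ∈ Ls.map Prod.fst)) := by
      by_cases h : pvName j ∈ Ls.map Prod.fst
      · have hne := hvn.2 h
        simp [h, hne]
      · have heq : PySem.List.pyGetD parent j (-1) = -1 := by
          by_contra hc; exact h (hvn.1 hc)
        simp [h, heq]
    have hcont : ((Ls.map Prod.fst ++ ban).contains (pvName j))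
        = (decide (pvName j ∈ Ls.map Prod.fst) || decide (pvName j ∈ ban)) := by
      by_cases h1 : pvName j ∈ Ls.map Prod.fst <;> by_cases h2 : pvName j ∈ ban <;>
        simp [h1, h2, List.mem_append]
    unfold pvCond pvBanned
    rw [hbspec, hvb, hcont]
    rw [Bool.false_or]
    generalize decide (pvName j ∈ Ls.map Prod.fst) = x
    generalize decide (pvName j ∈ ban) = y
    generalize (PySem.List.pyGetD (PySem.List.pyGetD mat u []) j 0 == 1) = r
    cases x <;> cases y <;> cases r <;> rfl
  rw [hfilt]
  apply List.map_congr_left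
  intro j hj
  obtain ⟨hj0, hjn'⟩ := (PySem.List.mem_pyRange_one).1 (List.mem_filter.1 hj).1
  exact pvSommets_get n j hj0 (by exact_mod_cast hjn')

-- ---- the two loops advance in lockstep ----
lemma pvLockstep (mat : List (List Int)) (a : String) (ban : List String) (n : Nat)
    (hn : n = mat.length) (s0 : Int) (d : String) :
    ∀ (fuel : Nat) (Ls : List (String × List String)) (parent : List Int) (q : List Int) (i : Nat),
      pvInv mat n s0 d ban Ls parent q → i ≤ Ls.length →
      pvLoopA mat a ban Ls i fuel
        = pvLoopBAlt mat n ((pvIdx n).getD a (-1)) s0 d (pvBanned n ban) parent q i fuel := by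
  intro fuel
  induction fuel with
  | zero => intro Ls parent q i _ _; rfl
  | succ fuel ih =>
    intro Ls parent q i inv hi
    rw [pvLoopA, pvLoopBAlt]
    by_cases hlt : i < Ls.length
    · have hltq : i < q.length := by rw [← inv.hql]; exact hlt
      rw [if_pos hlt, if_pos hltq]
      obtain ⟨hu0, hun, hname, hpath⟩ := inv.hentry i hlt hltq
      have hLs : Ls.getD i ("", []) = Ls[i]'hlt := by
        rw [List.getD_eq_getElem?_getD, List.getElem?_eq_getElem hlt]; rfl
      have hq : q.getD i 0 = q[i] := by
        rw [List.getD_eq_getElem?_getD, List.getElem?_eq_getElem hltq]; rfl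
      rw [hLs, hq]
      have htest : ((Ls[i]'hlt).1 == a) = (q[i] == (pvIdx n).getD a (-1)) := by
        rw [hname]
        exact pvTarget_eq n a q[i] hu0 hun
      by_cases hhit : ((Ls[i]'hlt).1 == a) = true
      · rw [if_pos hhit, if_pos (htest ▸ hhit)]
        exact hpath
      · rw [if_neg hhit, if_neg (fun h => hhit (htest ▸ h))]
        simp only []
        set u := q[i] with hu
        have huvis : PySem.List.pyGetD parent u (-1) ≠ -1 := by
          rw [inv.hvisname u hu0 hun, ← hname]
          exact List.mem_map_of_mem (List.getElem_mem _)
        obtain ⟨hq2, hinv2⟩ := pvInnerFold mat n s0 d ban u hu0 hun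
          (PySem.List.pyGetD mat u []) (pvBanned n ban)
          (PySem.List.pyRange 0 (n : Int) 1)
          (PySem.List.nodup_pyRange_one 0 (n : Int))
          (by
            intro j hj
            obtain ⟨h1, h2⟩ := (PySem.List.mem_pyRange_one).1 hj
            exact ⟨h1, by exact_mod_cast h2⟩)
          parent q Ls ((Ls[i]'hlt).2) inv huvis hpath
        have hsucc := pvSucc_eq mat n hn s0 d ban Ls parent q inv u hu0 hun
        rw [hname, hsucc]
        have hmapmap : (((PySem.List.pyRange 0 (n : Int) 1).filter
              (pvCond (PySem.List.pyGetD mat u []) (pvBanned n ban) parent)).map pvName).map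
              (fun t => (t, (Ls[i]'hlt).2 ++ [t]))
            = ((PySem.List.pyRange 0 (n : Int) 1).filter
              (pvCond (PySem.List.pyGetD mat u []) (pvBanned n ban) parent)).map
              (fun j => (pvName j, (Ls[i]'hlt).2 ++ [pvName j])) := by
          rw [List.map_map]; rfl
        rw [hmapmap]
        have hbound : i + 1 ≤ (Ls ++ ((PySem.List.pyRange 0 (n : Int) 1).filter
              (pvCond (PySem.List.pyGetD mat u []) (pvBanned n ban) parent)).map
              (fun j => (pvName j, (Ls[i]'hlt).2 ++ [pvName j]))).length := by
          rw [List.length_append]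
          omega
        rw [ih _ _ _ (i + 1) hinv2 hbound]
    · have hltq : ¬ i < q.length := by rw [← inv.hql]; exact hlt
      rw [if_neg hlt, if_neg hltq]

-- the initial state satisfies the invariant
lemma pvInv_init (mat : List (List Int)) (n : Nat) (hn : n = mat.length) (s0 : Int) (d : String)
    (ban : List String) (h0 : 0 ≤ s0) (hsn : s0 < n) (hname : pvName s0 = d) :
    pvInv mat n s0 d ban [(d, [d])]
      (PySem.List.pySetD (List.replicate n (-1 : Int)) s0 s0) [s0] := by
  have hlen : (PySem.List.pySetD (List.replicate n (-1 : Int)) s0 s0).length = n := by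
    rw [PySem.List.pySetD_of_nonneg _ _ h0]; simp
  have hget : ∀ x : Int, 0 ≤ x → x < n →
      PySem.List.pyGetD (PySem.List.pySetD (List.replicate n (-1 : Int)) s0 s0) x (-1)
        = if x = s0 then s0 else -1 := by
    intro x hx0 hxn
    rw [pvGet_set (List.replicate n (-1)) s0 x s0 h0 (by simpa using hsn) hx0 (by simpa using hxn)]
    split_ifs with h
    · rfl
    · rw [PySem.List.pyGetD_eq_getElem _ _ hx0 (by simpa using hxn)]
      simp
  have hs0self : PySem.List.pyGetD (PySem.List.pySetD (List.replicate n (-1 : Int)) s0 s0) s0 (-1)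
      = s0 := by rw [hget s0 h0 hsn, if_pos rfl]
  constructor
  · exact hlen
  · exact h0
  · exact hsn
  · exact hs0self
  · exact hname
  · rfl
  · intro k hkL hkq
    have hk0 : k = 0 := by simpa using hkq
    subst hk0
    refine ⟨h0, hsn, by simpa using hname.symm, ?_⟩
    show [d] = ((pvBuildPath _ s0 (n + 1) s0 []) ++ [d]).reverse
    have : pvBuildPath (PySem.List.pySetD (List.replicate n (-1 : Int)) s0 s0) s0 (n + 1) s0 []
        = [] := by
      obtain ⟨n', rfl⟩ : ∃ n', n = n' + 1 := ⟨n - 1, by omega⟩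
      rw [pvBuildPath]; simp
    rw [this]; simp
  · intro v hv0 hvn
    rw [hget v hv0 hvn]
    simp only [List.map_cons, List.map_nil, List.mem_singleton]
    constructor
    · intro h
      have hvs : v = s0 := by by_contra hne; rw [if_neg hne] at h; exact h rfl
      rw [hvs, hname]
    · intro h
      have : v = s0 := pvName_inj hv0 h0 (by rw [h, hname])
      rw [if_pos this]; omega
  · intro v hv0 hvn hvis
    rw [hget v hv0 hvn] at hvis
    have hvs : v = s0 := by by_contra hne; rw [if_neg hne] at hvis; exact hvis rfl
    refine ⟨0, ?_, hvs⟩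
    have : pvCountVis (PySem.List.pySetD (List.replicate n (-1 : Int)) s0 s0)
        = pvCountVis (List.replicate n (-1 : Int)) + 1 := by
      refine pvCountVis_set _ s0 s0 h0 (by simpa using hsn) ?_ (by omega)
      rw [PySem.List.pyGetD_eq_getElem _ _ h0 (by simpa using hsn)]
      simp
    rw [this]; omega
  · intro v hv0 hvn hvis
    rw [hget v hv0 hvn] at hvis ⊢
    have hvs : v = s0 := by by_contra hne; rw [if_neg hne] at hvis; exact hvis rfl
    rw [if_pos hvs]
    refine ⟨h0, hsn, ?_⟩
    rw [hs0self]; omega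

lemma pv_main (mat : List (List Int)) (d : String) (a : String) (ban : List String)
    (hpre : Pre_cheminB mat d a ban) : cheminB mat d a ban = cheminB_alt mat d a ban := by
  unfold cheminB cheminB_alt
  by_cases hda : d = a
  · rw [if_pos (by simp [hda])]
    show pvLoopA mat a ban [(d, [d])] 0 (mat.length + 1 + 1) = [d]
    rw [pvLoopA]
    simp [hda]
  · rw [if_neg (by simp [hda])]
    rcases hpre with hpre | ⟨_, hd⟩
    · exact absurd hpre hda
    have hd' : ∃ t : Nat, t < mat.length ∧ pvName (t : Int) = d := by
      simpa [List.mem_map, List.mem_range] using hd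
    obtain ⟨t, htlt, htd⟩ := hd'
    have htr : (t : Int) < mat.length := by exact_mod_cast htlt
    have hget : (pvIdx mat.length).get? d = some (t : Int) := by
      rw [← htd]
      exact pvIdx_get?_name mat.length (t : Int) (Int.natCast_nonneg t) htr
    rw [hget]
    exact pvLockstep mat a ban mat.length rfl (t : Int) d (mat.length + 2)
      [(d, [d])]
      (PySem.List.pySetD (List.replicate mat.length (-1 : Int)) (t : Int) (t : Int))
      [(t : Int)] 0
      (pvInv_init mat mat.length rfl (t : Int) d ban (Int.natCast_nonneg t) htr htd)
      (by simp)

-- ===== VERDICT (by name: the statement is the Claim_ definition above) =====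
theorem cheminB_spec : Claim_equal_cheminB := by
  intro mat d a ban _ hpre
  unfold Spec_cheminB
  exact pv_main mat d a ban hpre
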